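-- pv_equiv track=rewrite | github.com/jiroshimaya/arpakana | src/arpakana/arpabet.py | _insert_sokuon
-- ===== SOURCE A (Python) =====
-- _VOWELS = {"a", "i", "u", "e", "o"}
--
-- _SOKUON_CLUSTERS: set[tuple[str, ...]] = {
--     ("CH",),
--     ("SH",),
--     ("JH",),
--     ("ZH",),
--     ("T", "S"),
-- }
--
-- def _insert_sokuon(phoneme: list[str]) -> list[str]:
--     """Insert sokuon 'ッ' before certain clusters when preceded by a vowel."""
--     if not phoneme:
--         return []
--     result = [phoneme[0]]
--     # 最長一致のため長さ降順
--     cluster_lengths = sorted({len(c) for c in _SOKUON_CLUSTERS}, reverse=True)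
--
--     i = 1
--     n = len(phoneme)
--     while i < n:
--         for L in cluster_lengths:
--             if i + L <= n and tuple(phoneme[i:i+L]) in _SOKUON_CLUSTERS and result[-1] in _VOWELS:
--                 result.append("ッ")
--                 break
--         result.append(phoneme[i])
--         i += 1
--     return result
-- ===== SOURCE B (Python) =====
-- _VOWELS = {"a", "i", "u", "e", "o"}
--
-- _SOKUON_CLUSTERS: set[tuple[str, ...]] = {
--     ("CH",),
--     ("SH",),
--     ("JH",),
--     ("ZH",),
--     ("T", "S"),
-- }
--
--
-- def _insert_sokuon(phoneme: list[str]) -> list[str]: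
--     """Insert sokuon 'ッ' before certain clusters when preceded by a vowel.
--
--     Two passes: first collect the insertion positions, then build the output.
--     """
--     if not phoneme:
--         return []
--     n = len(phoneme)
--     marks = set()
--     for i in range(1, n):
--         if phoneme[i - 1] in _VOWELS and (
--             (phoneme[i],) in _SOKUON_CLUSTERS
--             or (i + 1 < n and (phoneme[i], phoneme[i + 1]) in _SOKUON_CLUSTERS)
--         ):
--             marks.add(i)
--     out = [phoneme[0]]
--     for i in range(1, n):
--         if i in marks:
--             out.append("ッ")
--         out.append(phoneme[i])
--     return out
-- ===== Notes on version B (the rewrite author's own statement) =====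
-- stated objective: alternative
-- what changed: Replaces A's single while-loop with longest-match inner for/break over cluster lengths, per-step list slicing and a result[-1] lookback by a two-pass scheme: one index pass collects the set of insertion positions from phoneme directly (prev-is-vowel and single- or two-token cluster test), a second pass assembles the output from that set.
import Mathlib
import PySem

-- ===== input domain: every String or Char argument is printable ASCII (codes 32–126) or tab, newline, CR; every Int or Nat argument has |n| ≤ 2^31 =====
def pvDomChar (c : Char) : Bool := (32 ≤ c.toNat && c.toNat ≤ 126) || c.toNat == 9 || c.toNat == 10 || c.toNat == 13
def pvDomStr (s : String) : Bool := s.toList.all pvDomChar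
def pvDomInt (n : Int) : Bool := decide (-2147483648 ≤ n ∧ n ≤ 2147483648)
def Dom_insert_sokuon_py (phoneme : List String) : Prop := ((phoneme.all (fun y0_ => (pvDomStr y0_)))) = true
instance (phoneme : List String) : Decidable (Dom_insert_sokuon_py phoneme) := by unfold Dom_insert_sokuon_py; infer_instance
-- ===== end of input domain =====

-- B replaces A's while-loop (inner longest-match for/break over cluster lengths, lookback at
-- result[-1]) with a two-pass scheme: collect the set of insertion positions, then assemble.

-- ===== PORT A =====
def pvVowels : List String := ["a", "i", "u", "e", "o"]
def pvClusters : List (List String) := [["CH"], ["SH"], ["JH"], ["ZH"], ["T", "S"]]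

-- cluster_lengths = sorted({len(c) for c in _SOKUON_CLUSTERS}, reverse=True)
def pvClusterLengths : List Nat :=
  PySem.List.sorted (PySem.Set.ofList (pvClusters.map List.length)) (fun x => x) true

-- inner 'for L in cluster_lengths: … break'.  The while-loop index i is carried as the
-- remaining suffix rest = phoneme[i:], so 'i + L <= n' is 'L ≤ rest.length' and
-- tuple(phoneme[i:i+L]) is 'rest.take L'; result[-1] via pyGetD (result is never empty).
def pvAFor (lengths : List Nat) (rest result : List String) : List String :=
  match lengths with
  | [] => result
  | L :: Ls =>
    if L ≤ rest.length ∧ rest.take L ∈ pvClusters ∧ PySem.List.pyGetD result (-1) "" ∈ pvVowels then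
      result ++ ["ッ"]
    else pvAFor Ls rest result

-- while i < n: (inner for, then result.append(phoneme[i]); i += 1)
def pvALoop (rest result : List String) : List String :=
  match rest with
  | [] => result
  | x :: rs => pvALoop rs (pvAFor pvClusterLengths (x :: rs) result ++ [x])

def insert_sokuon_py (phoneme : List String) : List String :=
  match phoneme with
  | [] => []
  | p0 :: rest => pvALoop rest [p0]

-- ===== PORT B =====
-- the mark condition of Source B's first pass, at index i
def pvBCond (phoneme : List String) (n : Int) (i : Int) : Bool :=
  decide (PySem.List.pyGetD phoneme (i - 1) "" ∈ pvVowels ∧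
    ([PySem.List.pyGetD phoneme i ""] ∈ pvClusters ∨
      (i + 1 < n ∧
        [PySem.List.pyGetD phoneme i "", PySem.List.pyGetD phoneme (i + 1) ""] ∈ pvClusters)))

def insert_sokuon_py_alt (phoneme : List String) : List String :=
  match phoneme with
  | [] => []
  | p0 :: _ =>
    let n : Int := phoneme.length
    let marks : PySem.Set Int :=
      (PySem.List.pyRange 1 n 1).foldl
        (fun s i => if pvBCond phoneme n i then PySem.Set.add s i else s) PySem.Set.empty
    (PySem.List.pyRange 1 n 1).foldl
      (fun out i =>
        (if marks.contains i then out ++ ["ッ"] else out) ++ [PySem.List.pyGetD phoneme i ""])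
      [p0]

-- ===== PRECONDITION & SPEC =====
def Spec_insert_sokuon_py (phoneme : List String) (out : List String) : Prop := out = insert_sokuon_py_alt phoneme
instance (phoneme : List String) (out : List String) : Decidable (Spec_insert_sokuon_py phoneme out) := by unfold Spec_insert_sokuon_py; infer_instance

-- ===== CLAIM (what is proved, stated in full; the proofs are below) =====
def Claim_equal_insert_sokuon_py : Prop := ∀ (phoneme : List String), Dom_insert_sokuon_py phoneme → Spec_insert_sokuon_py phoneme (insert_sokuon_py phoneme)

-- ===== LEMMAS AND PROOFS =====

-- common reference function: emit the tail of the answer, given the previous token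
def pvEmit (prev : String) : List String → List String
  | [] => []
  | x :: rs =>
    (if prev ∈ pvVowels ∧ ([x] ∈ pvClusters ∨ (x :: rs).take 2 ∈ pvClusters) then ["ッ", x]
     else [x]) ++ pvEmit x rs

theorem pvClusterLengths_eq : pvClusterLengths = [2, 1] := by decide

theorem pvALoop_eq (rest : List String) : ∀ (acc : List String) (h : acc ≠ []),
    pvALoop rest acc = acc ++ pvEmit (acc.getLast h) rest := by
  induction rest with
  | nil => intro acc h; simp [pvALoop, pvEmit]
  | cons x rs ih =>
    intro acc h
    show pvALoop rs (pvAFor pvClusterLengths (x :: rs) acc ++ [x]) = _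
    rw [pvClusterLengths_eq]
    have hlast : PySem.List.pyGetD acc (-1) "" = acc.getLast h := PySem.List.pyGetD_neg_one acc "" h
    have hx : ∀ F : List String, pvALoop rs (F ++ [x]) = (F ++ [x]) ++ pvEmit x rs := by
      intro F
      have := ih (F ++ [x]) (by simp)
      simpa [List.getLast_append] using this
    have hFor : pvAFor [2, 1] (x :: rs) acc =
        if acc.getLast h ∈ pvVowels ∧ ([x] ∈ pvClusters ∨ (x :: rs).take 2 ∈ pvClusters) then
          acc ++ ["ッ"]
        else acc := by
      rcases rs with _ | ⟨y, ys⟩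
      · by_cases h1 : [x] ∈ pvClusters <;> by_cases h3 : acc.getLast h ∈ pvVowels <;>
          simp [pvAFor, hlast, h1, h3]
      · by_cases h1 : [x, y] ∈ pvClusters <;> by_cases h2 : [x] ∈ pvClusters <;>
          by_cases h3 : acc.getLast h ∈ pvVowels <;>
          simp [pvAFor, hlast, h1, h2, h3]
    rw [hFor]
    simp only [pvEmit]
    by_cases hc : acc.getLast h ∈ pvVowels ∧ ([x] ∈ pvClusters ∨ (x :: rs).take 2 ∈ pvClusters)
    · rw [if_pos hc, if_pos hc, hx (acc ++ ["ッ"])]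
      simp
    · rw [if_neg hc, if_neg hc, hx acc]
      simp

theorem pvA_eq (phoneme : List String) :
    insert_sokuon_py phoneme =
      match phoneme with
      | [] => []
      | p0 :: rest => p0 :: pvEmit p0 rest := by
  rcases phoneme with _ | ⟨p0, rest⟩
  · rfl
  · show pvALoop rest [p0] = _
    have := pvALoop_eq rest [p0] (by simp)
    simpa using this

-- marks membership: j is collected iff it is in the range and the condition holds
theorem pvMarks_mem (phoneme : List String) (n : Int) :
    ∀ (l : List Int) (s : PySem.Set Int) (j : Int),
      (j ∈ l.foldl (fun s i => if pvBCond phoneme n i then PySem.Set.add s i else s) s ↔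
        j ∈ s ∨ (j ∈ l ∧ pvBCond phoneme n j = true)) := by
  intro l
  induction l with
  | nil => intro s j; simp
  | cons a as ih =>
    intro s j
    simp only [List.foldl_cons]
    by_cases ha : pvBCond phoneme n a = true
    · rw [if_pos ha, ih]
      simp only [PySem.Set.mem_add, List.mem_cons]
      constructor
      · rintro ((h | rfl) | h)
        · exact Or.inl h
        · exact Or.inr ⟨Or.inl rfl, ha⟩
        · exact Or.inr ⟨Or.inr h.1, h.2⟩
      · rintro (h | ⟨(rfl | h), hc⟩)
        · exact Or.inl (Or.inl h)
        · exact Or.inl (Or.inr rfl)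
        · exact Or.inr ⟨h, hc⟩
    · rw [if_neg ha, ih]
      simp only [List.mem_cons]
      constructor
      · rintro (h | h)
        · exact Or.inl h
        · exact Or.inr ⟨Or.inr h.1, h.2⟩
      · rintro (h | ⟨(rfl | h), hc⟩)
        · exact Or.inl h
        · exact absurd hc ha
        · exact Or.inr ⟨h, hc⟩

-- the second pass of B, from index i on, appends pvEmit phoneme[i-1] (phoneme.drop i)
theorem pvBLoop_eq (phoneme : List String) (marks : PySem.Set Int)
    (hm : ∀ j : Int, (marks.contains j = true ↔
        (1 ≤ j ∧ j < (phoneme.length : Int) ∧ pvBCond phoneme (phoneme.length) j = true))) :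
    ∀ (i : Nat), 1 ≤ i → i ≤ phoneme.length → ∀ (acc : List String),
      (PySem.List.pyRange (i : Int) (phoneme.length : Int) 1).foldl
        (fun out j =>
          (if marks.contains j then out ++ ["ッ"] else out) ++ [PySem.List.pyGetD phoneme j ""])
        acc
      = acc ++ pvEmit (phoneme.getD (i - 1) "") (phoneme.drop i) := by
  intro i h1 h2
  induction hk : phoneme.length - i generalizing i with
  | zero =>
    intro acc
    have hi : i = phoneme.length := by omega
    rw [PySem.List.pyRange_one_eq_nil (by exact_mod_cast le_of_eq hi.symm)]
    simp [hi, pvEmit]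
  | succ k ih =>
    intro acc
    have hlt : i < phoneme.length := by omega
    rw [PySem.List.pyRange_one_cons (by exact_mod_cast hlt)]
    simp only [List.foldl_cons]
    have hdrop : phoneme.drop i = phoneme[i] :: phoneme.drop (i + 1) :=
      List.drop_eq_getElem_cons hlt
    have hgi : PySem.List.pyGetD phoneme (i : Int) "" = phoneme[i] := by
      rw [PySem.List.pyGetD_natCast]; exact List.getD_eq_getElem _ _ hlt
    have hcontains : marks.contains (i : Int) = true ↔
        pvBCond phoneme (phoneme.length) (i : Int) = true := by
      rw [hm]
      constructor
      · exact fun h => h.2.2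
      · exact fun h => ⟨by exact_mod_cast h1, by exact_mod_cast hlt, h⟩
    have hprev : PySem.List.pyGetD phoneme ((i : Int) - 1) "" = phoneme.getD (i - 1) "" := by
      have : ((i : Int) - 1) = ((i - 1 : Nat) : Int) := by omega
      rw [this, PySem.List.pyGetD_natCast]
    -- the mark condition at i equals pvEmit's condition at phoneme[i]
    have hg2 : i + 1 < phoneme.length → PySem.List.pyGetD phoneme ((i : Int) + 1) "" = phoneme.getD (i + 1) "" := by
      intro _
      have : ((i : Int) + 1) = ((i + 1 : Nat) : Int) := by omega
      rw [this, PySem.List.pyGetD_natCast]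
    have hcond : pvBCond phoneme (phoneme.length) (i : Int) = true ↔
        (phoneme.getD (i - 1) "" ∈ pvVowels ∧
          ([phoneme[i]] ∈ pvClusters ∨
            (phoneme[i] :: phoneme.drop (i + 1)).take 2 ∈ pvClusters)) := by
      unfold pvBCond
      rw [decide_eq_true_iff, hprev, hgi]
      by_cases hn' : i + 1 < phoneme.length
      · have hd2 : phoneme.drop (i + 1) = phoneme[i + 1] :: phoneme.drop (i + 2) :=
          List.drop_eq_getElem_cons hn'
        have ht2 : (phoneme[i] :: phoneme.drop (i + 1)).take 2 = [phoneme[i], phoneme[i + 1]] := by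
          rw [hd2]; rfl
        have hv2 : PySem.List.pyGetD phoneme ((i : Int) + 1) "" = phoneme[i + 1] := by
          rw [hg2 hn']; exact List.getD_eq_getElem _ _ hn'
        rw [ht2, hv2]
        have hni : (i : Int) + 1 < (phoneme.length : Int) := by exact_mod_cast hn'
        simp [hni]
      · have hd2 : phoneme.drop (i + 1) = [] := by
          apply List.drop_eq_nil_of_le; omega
        have ht2 : (phoneme[i] :: phoneme.drop (i + 1)).take 2 = [phoneme[i]] := by
          rw [hd2]; rfl
        have hni : ¬ ((i : Int) + 1 < (phoneme.length : Int)) := by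
          intro hcontra; exact hn' (by exact_mod_cast hcontra)
        rw [ht2]
        simp [hni]
    have hrec := ih (i + 1) (by omega) (by omega) (by omega)
    have hcast : ((i : Int) + 1) = ((i + 1 : Nat) : Int) := by omega
    rw [hcast, hrec, hdrop]
    show _ = acc ++ pvEmit _ (phoneme[i] :: phoneme.drop (i + 1))
    rw [pvEmit]
    have hprevnext : phoneme.getD (i + 1 - 1) "" = phoneme[i] := by
      have he : i + 1 - 1 = i := by omega
      rw [he]; exact List.getD_eq_getElem _ _ hlt
    rw [hprevnext, hgi]
    by_cases hb : pvBCond phoneme (phoneme.length) (i : Int) = true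
    · rw [if_pos (hcontains.mpr hb), if_pos (hcond.mp hb)]
      simp
    · rw [if_neg (fun h => hb (hcontains.mp h)), if_neg (fun h => hb (hcond.mpr h))]
      simp

theorem pvB_eq (phoneme : List String) :
    insert_sokuon_py_alt phoneme =
      match phoneme with
      | [] => []
      | p0 :: rest => p0 :: pvEmit p0 rest := by
  rcases phoneme with _ | ⟨p0, rest⟩
  · rfl
  · show (PySem.List.pyRange 1 ((p0 :: rest).length : Int) 1).foldl _ [p0] = _
    have hm : ∀ j : Int,
        ((((PySem.List.pyRange 1 ((p0 :: rest).length : Int) 1).foldl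
            (fun s i => if pvBCond (p0 :: rest) ((p0 :: rest).length : Int) i then PySem.Set.add s i else s)
            PySem.Set.empty : PySem.Set Int).contains j) = true ↔
          (1 ≤ j ∧ j < ((p0 :: rest).length : Int) ∧
            pvBCond (p0 :: rest) ((p0 :: rest).length : Int) j = true)) := by
      intro j
      rw [PySem.Set.contains_iff,
        pvMarks_mem (p0 :: rest) ((p0 :: rest).length : Int) _ PySem.Set.empty j]
      simp [PySem.Set.empty, PySem.List.mem_pyRange_one, and_assoc]
    have := pvBLoop_eq (p0 :: rest) _ hm 1 le_rfl (by simp) [p0]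
    simp only [Nat.cast_one] at this ⊢
    rw [this]
    simp

-- ===== VERDICT (by name: the statement is the Claim_ definition above) =====
theorem insert_sokuon_py_spec : Claim_equal_insert_sokuon_py := by
  intro phoneme _
  show insert_sokuon_py phoneme = insert_sokuon_py_alt phoneme
  rw [pvA_eq, pvB_eq]
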